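-- pv_equiv track=rewrite | github.com/daniel-reich/ubiquitous-fiesta | SHdu4GwBQehhDm4xT_14.py | freed_prisoners
-- ===== SOURCE A (Python) =====
-- def freed_prisoners(prison):
--   if prison[0] == 0:
--     return 0
--   i = 0
--   c = 0
--   while i < len(prison):
--     if prison[i] == 1:
--       c += 1
--       for j in range(len(prison)):
--         if prison[j] == 1:
--           prison[j] = 0
--         else:
--           prison[j] = 1
--     i += 1
--   return c
-- ===== SOURCE B (Python) =====
-- def freed_prisoners(prison):
--     # Single pass tracking flip parity (c) instead of rewriting the whole array;
--     # does not mutate the input (A does); return value is identical.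
--     if prison[0] == 0:
--         return 0
--     c = 0
--     for x in prison:
--         if (x == 1) if c % 2 == 0 else (x != 1):
--             c += 1
--     return c
-- ===== Notes on version B (the rewrite author's own statement) =====
-- stated objective: faster
-- what changed: B replaces A's rewrite-the-whole-array-on-every-hit loop by a single pass that tracks the flip parity in the counter c, deciding each cell from its original value and c mod 2; B also does not mutate the input list (A does).
import Mathlib
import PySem

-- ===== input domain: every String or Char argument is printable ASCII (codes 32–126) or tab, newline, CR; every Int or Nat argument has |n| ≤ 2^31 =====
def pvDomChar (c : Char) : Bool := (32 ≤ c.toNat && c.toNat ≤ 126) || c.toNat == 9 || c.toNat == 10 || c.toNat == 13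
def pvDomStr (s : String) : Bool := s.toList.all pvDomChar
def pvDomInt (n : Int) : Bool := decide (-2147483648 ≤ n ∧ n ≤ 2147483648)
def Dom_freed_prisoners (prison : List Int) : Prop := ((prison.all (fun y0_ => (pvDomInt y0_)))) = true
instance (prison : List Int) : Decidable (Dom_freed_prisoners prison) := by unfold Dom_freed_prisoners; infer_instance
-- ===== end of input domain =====

-- B: one pass tracking flip parity in the counter instead of flipping the whole array on each hit.
-- Equivalence is about the RETURN value only: Python A mutates its argument in place, B does not.

-- ===== PORT A =====
-- A's inner for-loop: global flip of the array (1 -> 0, everything else -> 1)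
def pvFlipA (l : List Int) : List Int := l.map (fun x => if x = 1 then 0 else 1)

-- A's while-loop: i the index, pr the (mutated) array, c the count; fuel = remaining iterations
def pvLoopA : Nat → Nat → List Int → Int → Int
  | 0, _, _, c => c
  | Nat.succ fuel, i, pr, c =>
      if pr.getD i 0 = 1 then pvLoopA fuel (i+1) (pvFlipA pr) (c+1)
      else pvLoopA fuel (i+1) pr c

def freed_prisoners (prison : List Int) : Int :=
  if prison.getD 0 0 = 0 then 0
  else pvLoopA prison.length 0 prison 0

-- ===== PORT B =====
def freed_prisoners_alt (prison : List Int) : Int :=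
  if prison.getD 0 0 = 0 then 0
  else prison.foldl
    (fun c x => if (if c % 2 = 0 then x = 1 else x ≠ 1) then c + 1 else c) 0

-- ===== PRECONDITION & SPEC =====
-- A raises IndexError on the empty list (prison[0]); excluded.
def Pre_freed_prisoners (prison : List Int) : Prop := prison ≠ []
instance (prison : List Int) : Decidable (Pre_freed_prisoners prison) := by unfold Pre_freed_prisoners; infer_instance
def pvWitness_freed_prisoners : List Int := ([1, 0, 1])

def Spec_freed_prisoners (prison : List Int) (out : Int) : Prop := out = freed_prisoners_alt prison
instance (prison : List Int) (out : Int) : Decidable (Spec_freed_prisoners prison out) := by unfold Spec_freed_prisoners; infer_instance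

-- ===== CLAIM (what is proved, stated in full; the proofs are below) =====
def Claim_equal_freed_prisoners : Prop := ∀ (prison : List Int), Dom_freed_prisoners prison → Pre_freed_prisoners prison → Spec_freed_prisoners prison (freed_prisoners prison)

-- ===== LEMMAS AND PROOFS =====

-- the single-cell flip
def pvF (x : Int) : Int := if x = 1 then 0 else 1

-- A's loop, recast structurally on the not-yet-visited suffix
def pvLoopB : List Int → Int → Int
  | [], c => c
  | x :: xs, c =>
      if x = 1 then pvLoopB (xs.map pvF) (c + 1) else pvLoopB xs c
termination_by xs _ => xs.length
decreasing_by all_goals simp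

lemma pvLoopB_nil (c : Int) : pvLoopB [] c = c := by rw [pvLoopB]

lemma pvLoopB_cons (x : Int) (xs : List Int) (c : Int) :
    pvLoopB (x :: xs) c = if x = 1 then pvLoopB (xs.map pvF) (c + 1) else pvLoopB xs c := by
  rw [pvLoopB]

lemma pvFlipA_eq_map (l : List Int) : pvFlipA l = l.map pvF := rfl

lemma pvLoopA_eq_loopB :
    ∀ (n : Nat) (xs pr : List Int) (i : Nat) (c : Int),
      xs.length = n → pr.drop i = xs → pvLoopA n i pr c = pvLoopB xs c := by
  intro n
  induction n with
  | zero =>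
    intro xs pr i c hlen _
    have hx : xs = [] := List.eq_nil_of_length_eq_zero hlen
    rw [hx, pvLoopB_nil, pvLoopA]
  | succ n ih =>
    intro xs pr i c hlen hdrop
    match xs, hlen with
    | x :: xs, hlen =>
      have hlen' : xs.length = n := by simpa using hlen
      have h0 : pr[i]? = some x := by
        have h : (pr.drop i)[0]? = some x := by rw [hdrop]; rfl
        rw [List.getElem?_drop] at h
        simpa using h
      have hget : pr.getD i 0 = x := by simp [List.getD, h0]
      have hdrop' : pr.drop (i+1) = xs := by
        have h : (pr.drop i).drop 1 = xs := by rw [hdrop]; simp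
        rw [List.drop_drop] at h
        simpa [Nat.add_comm] using h
      rw [pvLoopA, hget, pvLoopB_cons]
      by_cases hx : x = 1
      · rw [if_pos hx, if_pos hx]
        have hmd : (pvFlipA pr).drop (i+1) = xs.map pvF := by
          rw [pvFlipA_eq_map, ← List.map_drop, hdrop']
        exact ih (xs.map pvF) (pvFlipA pr) (i+1) (c+1) (by simpa using hlen') hmd
      · rw [if_neg hx, if_neg hx]
        exact ih xs pr (i+1) c hlen' hdrop'

-- value of the n-times-flipped cell
lemma pvF_iter_eq_one :
    ∀ (n : Nat) (x : Int), (pvF^[n] x = 1) ↔ (x = 1 ↔ n % 2 = 0) := by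
  intro n
  induction n with
  | zero => intro x; simp
  | succ n ih =>
    intro x
    rw [Function.iterate_succ_apply, ih (pvF x)]
    have hf : pvF x = 1 ↔ ¬ x = 1 := by
      unfold pvF; by_cases h : x = 1 <;> simp [h]
    rw [hf]
    by_cases h : x = 1 <;> simp [h] <;> omega

-- parity lemma: A's structural loop on the n-times-flipped suffix equals B's fold on the original suffix
lemma pvLoopB_eq_fold :
    ∀ (xs : List Int) (n : Nat) (c : Int), c % 2 = (n : Int) % 2 →
      pvLoopB (xs.map (pvF^[n])) c =
      xs.foldl (fun c x => if (if c % 2 = 0 then x = 1 else x ≠ 1) then c + 1 else c) c := by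
  intro xs
  induction xs with
  | nil => intro n c _; rw [List.map_nil, pvLoopB_nil, List.foldl_nil]
  | cons x xs ih =>
    intro n c hc
    rw [List.map_cons, pvLoopB_cons, List.foldl_cons]
    have hcond : (pvF^[n] x = 1) ↔ (if c % 2 = 0 then x = 1 else x ≠ 1) := by
      rw [pvF_iter_eq_one]
      by_cases h : c % 2 = 0
      · have hn' : n % 2 = 0 := by omega
        simp [h, hn']
      · have hn' : ¬ n % 2 = 0 := by omega
        simp [h, hn']
    by_cases hb : (if c % 2 = 0 then x = 1 else x ≠ 1)
    · rw [if_pos (hcond.mpr hb), if_pos hb]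
      have hmap : (xs.map (pvF^[n])).map pvF = xs.map (pvF^[n+1]) := by
        rw [List.map_map]
        congr 1
        funext y
        exact (Function.iterate_succ_apply' pvF n y).symm
      rw [hmap]
      exact ih (n+1) (c+1) (by push_cast; omega)
    · rw [if_neg (fun h => hb (hcond.mp h)), if_neg hb]
      exact ih n c hc

-- ===== VERDICT (by name: the statement is the Claim_ definition above) =====
theorem freed_prisoners_spec : Claim_equal_freed_prisoners := by
  intro prison _ _
  unfold Spec_freed_prisoners freed_prisoners freed_prisoners_alt
  by_cases h0 : prison.getD 0 0 = 0
  · rw [if_pos h0, if_pos h0]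
  · rw [if_neg h0, if_neg h0]
    have h1 : pvLoopA prison.length 0 prison 0 = pvLoopB prison 0 :=
      pvLoopA_eq_loopB prison.length prison prison 0 0 rfl rfl
    have h2 : pvLoopB (prison.map (pvF^[0])) 0 =
        prison.foldl (fun c x => if (if c % 2 = 0 then x = 1 else x ≠ 1) then c + 1 else c) 0 :=
      pvLoopB_eq_fold prison 0 0 (by norm_num)
    rw [Function.iterate_zero, List.map_id] at h2
    rw [h1, ← h2]
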